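-- pv_equiv track=rewrite | github.com/harshkolte01/hdf-viewer-isro | backend/src/storage/filesystem_client.py | _derive_parent_folders
-- ===== SOURCE A (Python) =====
-- from typing import Any, BinaryIO, Dict, List, Optional, Set
--
-- def _derive_parent_folders(key: str, normalized_prefix: str) -> Set[str]:
--     # Build synthetic folder entries from a file key's path components.
--     # The folder rows are not real filesystem entries; they let the UI render
--     # a tree without a separate "list directories" API call.
--     folders: Set[str] = set()
--     parts = [part for part in str(key).split("/") if part]
--     if len(parts) <= 1:
--         return folders
--
--     running = []
--     for part in parts[:-1]:
--         running.append(part)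
--         folder = "/".join(running) + "/"
--         if normalized_prefix and not folder.startswith(normalized_prefix):
--             continue
--         folders.add(folder)
--     return folders
-- ===== SOURCE B (Python) =====
-- from typing import Set
--
-- def _derive_parent_folders(key: str, normalized_prefix: str) -> Set[str]:
--     # Single scan over the joined path: every '/' in the normalized key marks a
--     # parent folder, whose name is the prefix up to that slash plus '/'.
--     folders: Set[str] = set()
--     parts = [part for part in str(key).split("/") if part]
--     if len(parts) <= 1:
--         return folders
--
--     s = "/".join(parts)
--     for i, ch in enumerate(s):
--         if ch != "/":
--             continue
--         folder = s[:i] + "/"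
--         if normalized_prefix and not folder.startswith(normalized_prefix):
--             continue
--         folders.add(folder)
--     return folders
-- ===== Notes on version B (the rewrite author's own statement) =====
-- stated objective: alternative
-- what changed: Instead of growing a running list of components and re-joining it for every part, B joins the filtered parts once and makes a single character scan over that string, emitting the prefix up to each '/' as a folder.
import Mathlib
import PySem

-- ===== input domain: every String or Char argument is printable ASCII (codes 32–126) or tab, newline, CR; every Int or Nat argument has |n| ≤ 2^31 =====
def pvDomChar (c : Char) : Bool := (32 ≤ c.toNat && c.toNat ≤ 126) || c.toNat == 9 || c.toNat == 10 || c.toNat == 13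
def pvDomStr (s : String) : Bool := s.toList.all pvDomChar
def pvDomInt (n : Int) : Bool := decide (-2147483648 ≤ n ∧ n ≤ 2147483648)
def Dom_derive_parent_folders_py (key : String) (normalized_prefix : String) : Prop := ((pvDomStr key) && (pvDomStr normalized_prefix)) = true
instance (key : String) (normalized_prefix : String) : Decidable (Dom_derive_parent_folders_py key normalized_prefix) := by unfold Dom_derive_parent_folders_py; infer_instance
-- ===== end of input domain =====

-- B replaces A's growing running-list-plus-rejoin with one join of the parts followed by a
-- single character scan emitting the prefix before each '/' (objective: alternative).

-- ===== PORT A =====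
-- loop body of A's 'for part in parts[:-1]' (state: running list of parts, result set)
def pvStepA (normalized_prefix : String) (st : List (List Char) × PySem.Set String)
    (part : List Char) : List (List Char) × PySem.Set String :=
  let running := st.1 ++ [part]
  let folder : String := String.ofList (PySem.Chars.join ['/'] running ++ ['/'])
  if normalized_prefix ≠ "" ∧ PySem.Str.startswith folder normalized_prefix = false
  then (running, st.2)
  else (running, st.2.add folder)

def derive_parent_folders_py (key : String) (normalized_prefix : String) : List String :=
  let parts : List (List Char) := (PySem.Chars.splitOn key.toList ['/']).filter (fun p => p ≠ [])
  if parts.length ≤ 1 then []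
  else (parts.dropLast.foldl (pvStepA normalized_prefix) ([], PySem.Set.empty)).2

-- ===== PORT B =====
-- loop body of B's 'for i, ch in enumerate(s)'; s is the joined path, captured
def pvStepB (normalized_prefix : String) (s : List Char) (folders : PySem.Set String)
    (ic : Int × Char) : PySem.Set String :=
  if ic.2 ≠ '/' then folders
  else
    let folder : String := String.ofList (PySem.List.slice s none (some ic.1) ++ ['/'])
    if normalized_prefix ≠ "" ∧ PySem.Str.startswith folder normalized_prefix = false
    then folders
    else folders.add folder

def derive_parent_folders_py_alt (key : String) (normalized_prefix : String) : List String :=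
  let parts : List (List Char) := (PySem.Chars.splitOn key.toList ['/']).filter (fun p => p ≠ [])
  if parts.length ≤ 1 then []
  else
    let s : List Char := PySem.Chars.join ['/'] parts
    (PySem.List.enumerate s).foldl (pvStepB normalized_prefix s) PySem.Set.empty

-- ===== PRECONDITION & SPEC =====
def Spec_derive_parent_folders_py (key : String) (normalized_prefix : String) (out : List String) : Prop := out = derive_parent_folders_py_alt key normalized_prefix
instance (key : String) (normalized_prefix : String) (out : List String) : Decidable (Spec_derive_parent_folders_py key normalized_prefix out) := by unfold Spec_derive_parent_folders_py; infer_instance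

-- ===== CLAIM (what is proved, stated in full; the proofs are below) =====
def Claim_equal_derive_parent_folders_py : Prop := ∀ (key : String) (normalized_prefix : String), Dom_derive_parent_folders_py key normalized_prefix → Spec_derive_parent_folders_py key normalized_prefix (derive_parent_folders_py key normalized_prefix)

-- ===== LEMMAS AND PROOFS =====

-- the folders B's scan adds while walking t with accumulated prefix pre
def pvTgt (np : String) (pre t : List Char) : List String :=
  match t with
  | [] => []
  | c :: t' =>
    (if c = '/' ∧ ¬ (np ≠ "" ∧ PySem.Str.startswith (String.ofList (pre ++ ['/'])) np = false)
     then [String.ofList (pre ++ ['/'])] else []) ++ pvTgt np (pre ++ [c]) t'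

-- the folders A's loop adds for the remaining parts l, given prefix pre (joined processed parts + '/')
def pvPj (np : String) (pre : List Char) (l : List (List Char)) : List String :=
  match l with
  | [] => []
  | p :: t =>
    (if ¬ (np ≠ "" ∧ PySem.Str.startswith (String.ofList (pre ++ p ++ ['/'])) np = false)
     then [String.ofList (pre ++ p ++ ['/'])] else []) ++ pvPj np (pre ++ p ++ ['/']) t

def pvJoinPre (r : List (List Char)) : List Char :=
  if r = [] then [] else PySem.Chars.join ['/'] r ++ ['/']

theorem pvJoin_append_singleton (r : List (List Char)) (p : List Char) (hr : r ≠ []) :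
    PySem.Chars.join ['/'] (r ++ [p]) = PySem.Chars.join ['/'] r ++ ['/'] ++ p := by
  induction r with
  | nil => simp at hr
  | cons a t ih =>
    cases t with
    | nil => simp [PySem.Chars.join_cons_cons, PySem.Chars.join_singleton]
    | cons b t' =>
      have h2 := ih (by simp)
      simp only [List.cons_append] at h2 ⊢
      rw [PySem.Chars.join_cons_cons, h2, PySem.Chars.join_cons_cons]
      simp

theorem pvJoinPre_append (r : List (List Char)) (p : List Char) :
    pvJoinPre (r ++ [p]) = pvJoinPre r ++ p ++ ['/'] := by
  rcases eq_or_ne r [] with h | h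
  · subst h; simp [pvJoinPre, PySem.Chars.join_singleton]
  · simp [pvJoinPre, h, pvJoin_append_singleton r p h]

theorem pvAdd_of_longer (acc : PySem.Set String) (f : String)
    (h : ∀ x ∈ acc, x.toList.length < f.toList.length) :
    PySem.Set.add acc f = acc ++ [f] := by
  have hm : f ∉ acc := fun hm => absurd rfl (Nat.ne_of_lt (h f hm))
  simp [PySem.Set.add, PySem.Set.contains, List.contains_eq_mem, hm]

theorem pvA_aux (np : String) (l r : List (List Char)) (acc : PySem.Set String)
    (hl : ∀ p ∈ l, p ≠ [])
    (hacc : ∀ x ∈ acc, x.toList.length ≤ (pvJoinPre r).length) :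
    (l.foldl (pvStepA np) (r, acc)).2 = acc ++ pvPj np (pvJoinPre r) l := by
  induction l generalizing r acc with
  | nil => simp [pvPj]
  | cons p t ih =>
    have hp : p ≠ [] := hl p (List.mem_cons_self ..)
    have hplen : 0 < p.length := List.length_pos_iff.mpr hp
    have hfold : PySem.Chars.join ['/'] (r ++ [p]) ++ ['/'] = pvJoinPre r ++ p ++ ['/'] := by
      rcases eq_or_ne r [] with h | h
      · subst h; simp [pvJoinPre, PySem.Chars.join_singleton]
      · rw [pvJoin_append_singleton r p h]; simp [pvJoinPre, h]
    have hlen : (pvJoinPre (r ++ [p])).length = (pvJoinPre r).length + p.length + 1 := by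
      rw [pvJoinPre_append]
      simp only [List.length_append, List.length_cons, List.length_nil]
      try omega
    have hl' : ∀ q ∈ t, q ≠ [] := fun q hq => hl q (List.mem_cons_of_mem _ hq)
    simp only [List.foldl_cons, pvStepA, hfold]
    by_cases hcond : np ≠ "" ∧ PySem.Str.startswith (String.ofList (pvJoinPre r ++ p ++ ['/'])) np = false
    · rw [if_pos hcond]
      have hacc' : ∀ x ∈ acc, x.toList.length ≤ (pvJoinPre (r ++ [p])).length := by
        intro x hx; have := hacc x hx; omega
      rw [ih (r ++ [p]) acc hl' hacc', pvJoinPre_append]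
      simp only [pvPj]
      rw [if_neg (not_not_intro hcond)]
      simp
    · rw [if_neg hcond]
      set f := String.ofList (pvJoinPre r ++ p ++ ['/']) with hf
      have hflen : f.toList.length = (pvJoinPre r).length + p.length + 1 := by
        simp only [hf, String.toList_ofList, List.length_append, List.length_cons,
          List.length_nil]
        try omega
      have hadd : PySem.Set.add acc f = acc ++ [f] := by
        apply pvAdd_of_longer
        intro x hx; have := hacc x hx; omega
      rw [hadd]
      have hacc' : ∀ x ∈ acc ++ [f], x.toList.length ≤ (pvJoinPre (r ++ [p])).length := by
        intro x hx
        rcases List.mem_append.mp hx with hx | hx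
        · have := hacc x hx; omega
        · simp only [List.mem_singleton] at hx; subst hx; omega
      rw [ih (r ++ [p]) (acc ++ [f]) hl' hacc', pvJoinPre_append]
      simp only [pvPj]
      rw [if_pos hcond, ← hf, ← List.append_assoc]

theorem pvB_aux (np : String) (t : List Char) : ∀ (p : List Char) (acc : PySem.Set String),
    (∀ x ∈ acc, x.toList.length ≤ p.length) →
    (PySem.List.enumerate t (p.length : Int)).foldl (pvStepB np (p ++ t)) acc
      = acc ++ pvTgt np p t := by
  induction t with
  | nil => intro p acc _; simp [PySem.List.enumerate, pvTgt]
  | cons c t' ih =>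
    intro p acc hacc
    rw [PySem.List.enumerate_cons, List.foldl_cons]
    have hslice : PySem.List.slice (p ++ c :: t') none (some ((p.length : Nat) : Int)) = p := by
      rw [PySem.List.slice_to _ (by positivity)]
      simp
    have hs : p ++ c :: t' = (p ++ [c]) ++ t' := by simp
    have henum : ((p.length : Int) + 1) = (((p ++ [c]).length : Nat) : Int) := by
      simp
    have hmono : ∀ x ∈ acc, x.toList.length ≤ (p ++ [c]).length := by
      intro x hx
      have := hacc x hx
      simp only [List.length_append, List.length_cons, List.length_nil]
      omega
    by_cases hc : c = '/'
    · subst hc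
      simp only [pvStepB]
      rw [if_neg (fun h => h rfl), hslice]
      by_cases hcond : np ≠ "" ∧ PySem.Str.startswith (String.ofList (p ++ ['/'])) np = false
      · rw [if_pos hcond, hs, henum, ih (p ++ ['/']) acc hmono]
        simp only [pvTgt]
        rw [if_neg (fun h => h.2 hcond)]
        rfl
      · rw [if_neg hcond]
        set f := String.ofList (p ++ ['/']) with hf
        have hadd : PySem.Set.add acc f = acc ++ [f] := by
          apply pvAdd_of_longer
          intro x hx
          have := hacc x hx
          simp only [hf, String.toList_ofList, List.length_append, List.length_cons,
            List.length_nil]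
          omega
        rw [hadd, hs, henum, ih (p ++ ['/']) (acc ++ [f]) ?_]
        · simp only [pvTgt]
          rw [if_pos ⟨trivial, hcond⟩, ← hf, ← List.append_assoc]
        · intro x hx
          rcases List.mem_append.mp hx with hx | hx
          · exact hmono x hx
          · simp only [List.mem_singleton] at hx
            subst hx
            simp [hf]
    · simp only [pvStepB]
      rw [if_pos hc, hs, henum, ih (p ++ [c]) acc hmono]
      simp only [pvTgt]
      rw [if_neg (fun h => hc h.1)]
      rfl

theorem pvTgt_no_slash (np : String) (q : List Char) : ∀ (pre rest : List Char), '/' ∉ q →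
    pvTgt np pre (q ++ rest) = pvTgt np (pre ++ q) rest := by
  induction q with
  | nil => intro pre rest _; simp
  | cons c q' ih =>
    intro pre rest hq
    have hc : c ≠ '/' := fun e => hq (by simp [e])
    have hq' : '/' ∉ q' := fun e => hq (by simp [e])
    simp only [List.cons_append, pvTgt, if_neg (by simp [hc] : ¬ (c = '/' ∧ _))]
    rw [ih (pre ++ [c]) rest hq']
    simp

theorem pvBridge (np : String) (l : List (List Char)) : ∀ (pre : List Char),
    (∀ p ∈ l, p ≠ [] ∧ '/' ∉ p) → l ≠ [] →
    pvTgt np pre (PySem.Chars.join ['/'] l) = pvPj np pre l.dropLast := by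
  induction l with
  | nil => intro pre _ hl; exact absurd rfl hl
  | cons x t ih =>
    intro pre h _
    have hx := h x (List.mem_cons_self ..)
    cases t with
    | nil =>
      rw [PySem.Chars.join_singleton]
      have := pvTgt_no_slash np x pre [] hx.2
      simpa [pvPj] using this
    | cons y t' =>
      rw [PySem.Chars.join_cons_cons]
      have hjoin : x ++ ['/'] ++ PySem.Chars.join ['/'] (y :: t')
          = x ++ ('/' :: PySem.Chars.join ['/'] (y :: t')) := by simp
      rw [hjoin, pvTgt_no_slash np x pre _ hx.2]
      have ih' := ih (pre ++ x ++ ['/'])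
        (fun p hp => h p (List.mem_cons_of_mem _ hp)) (by simp)
      simp only [pvTgt, pvPj, List.dropLast_cons₂, true_and]
      rw [ih']

-- no piece produced by splitting on '/' contains '/'
theorem pvGo_noslash : ∀ (fuel : Nat) (l cur : List Char) (acc : List (List Char)),
    l.length < fuel → '/' ∉ cur → (∀ p ∈ acc, '/' ∉ p) →
    ∀ p ∈ PySem.Chars.splitOn.go ['/'] fuel l cur acc, '/' ∉ p := by
  intro fuel
  induction fuel with
  | zero => intro l cur acc h; omega
  | succ n ih =>
    intro l cur acc hlen hcur hacc p hp
    cases l with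
    | nil =>
      simp only [PySem.Chars.splitOn.go] at hp
      rw [List.mem_reverse, List.mem_cons] at hp
      rcases hp with hp | hp
      · subst hp; simpa using hcur
      · exact hacc p hp
    | cons c rest =>
      simp only [PySem.Chars.splitOn.go] at hp
      by_cases hpre : List.isPrefixOf ['/'] (c :: rest) = true
      · rw [if_pos hpre] at hp
        refine ih _ [] (cur.reverse :: acc) (by simp at hlen ⊢; omega) (by simp) ?_ p hp
        intro q hq
        rcases List.mem_cons.mp hq with hq | hq
        · subst hq; simpa using hcur
        · exact hacc q hq
      · rw [if_neg hpre] at hp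
        have hc : c ≠ '/' := by
          intro e
          exact hpre (by simp [List.isPrefixOf, e])
        refine ih rest (c :: cur) acc (by simp at hlen ⊢; omega) ?_ hacc p hp
        intro hm
        rcases List.mem_cons.mp hm with hm | hm
        · exact hc hm.symm
        · exact hcur hm

theorem pvSplitOn_noslash (s : List Char) :
    ∀ p ∈ PySem.Chars.splitOn s ['/'], '/' ∉ p := by
  intro p hp
  exact pvGo_noslash (s.length + 1) s [] [] (by omega) (by simp) (by simp) p
    (by simpa [PySem.Chars.splitOn] using hp)

-- ===== VERDICT (by name: the statement is the Claim_ definition above) =====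
theorem derive_parent_folders_py_spec : Claim_equal_derive_parent_folders_py := by
  intro key np _
  unfold Spec_derive_parent_folders_py derive_parent_folders_py derive_parent_folders_py_alt
  set parts : List (List Char) :=
    (PySem.Chars.splitOn key.toList ['/']).filter (fun p => p ≠ []) with hparts
  by_cases h : parts.length ≤ 1
  · simp [h]
  · rw [if_neg h, if_neg h]
    have hmem : ∀ p ∈ parts, p ≠ [] ∧ '/' ∉ p := by
      intro p hp
      rw [hparts, List.mem_filter] at hp
      exact ⟨by simpa using hp.2, pvSplitOn_noslash key.toList p hp.1⟩
    have hne : parts ≠ [] := by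
      intro e; rw [e] at h; simp at h
    have hA := pvA_aux np parts.dropLast [] PySem.Set.empty
      (fun p hp => (hmem p (List.dropLast_subset _ hp)).1) (by simp [PySem.Set.empty])
    have hB := pvB_aux np (PySem.Chars.join ['/'] parts) [] PySem.Set.empty
      (by simp [PySem.Set.empty])
    simp only [PySem.Set.empty, List.nil_append, List.length_nil, Nat.cast_zero] at hA hB
    show (List.foldl (pvStepA np) ([], PySem.Set.empty) parts.dropLast).2
      = List.foldl (pvStepB np (PySem.Chars.join ['/'] parts)) PySem.Set.empty
          (PySem.List.enumerate (PySem.Chars.join ['/'] parts))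
    simp only [PySem.Set.empty]
    rw [hA, hB]
    have : pvJoinPre [] = ([] : List Char) := by simp [pvJoinPre]
    rw [this, pvBridge np parts [] hmem hne]
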